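-- pv_equiv track=rewrite | github.com/pateltanmayp/python_ai_and_games | semanticsimilarity.py | build_semantic_descriptors
-- ===== SOURCE A (Python) =====
-- def build_semantic_descriptors(sentences):
--     d = {}
--     for sentence in sentences:
--         for word in sentence:
--             if word not in d.keys():
--                 d[word] = {}
--
--     for sentence in sentences:
--         for word in sentence:
--             done = []
--             for i in range(len(sentence)):
--                 if sentence[i] not in done and sentence[i] != word:
--                     done.append(sentence[i])
--                     d[word].update({sentence[i]:1 + d[word].get(sentence[i], 0)})
--     return d
-- ===== SOURCE B (Python) =====
-- def build_semantic_descriptors(sentences):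
--     d = {}
--     for sentence in sentences:
--         counts = {}
--         for w in sentence:
--             counts[w] = counts.get(w, 0) + 1
--         for w, m in counts.items():
--             dw = d.get(w, {})
--             for u in counts:
--                 if u != w:
--                     dw[u] = dw.get(u, 0) + m
--             d[w] = dw
--     return d
-- ===== Notes on version B (the rewrite author's own statement) =====
-- stated objective: faster
-- what changed: A scans the whole sentence once per word occurrence with a linear 'done' list (O(L^3) per sentence); B builds a per-sentence multiplicity dict in one pass and then adds count m for each ordered pair of distinct words, so the inner rescans and the done-list disappear (O(L + D^2) per sentence with dict lookups).
import Mathlib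
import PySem

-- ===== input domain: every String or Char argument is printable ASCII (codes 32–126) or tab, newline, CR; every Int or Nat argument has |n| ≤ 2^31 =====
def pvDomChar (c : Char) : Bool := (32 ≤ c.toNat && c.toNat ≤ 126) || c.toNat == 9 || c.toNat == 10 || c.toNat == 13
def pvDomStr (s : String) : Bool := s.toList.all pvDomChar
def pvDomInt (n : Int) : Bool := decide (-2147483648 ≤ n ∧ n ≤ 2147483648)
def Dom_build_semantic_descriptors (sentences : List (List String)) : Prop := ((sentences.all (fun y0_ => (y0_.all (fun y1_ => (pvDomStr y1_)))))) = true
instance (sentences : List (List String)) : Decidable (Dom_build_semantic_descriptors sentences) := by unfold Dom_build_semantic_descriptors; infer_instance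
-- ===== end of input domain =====

-- B replaces A's per-occurrence whole-sentence rescan (with a linear `done` list) by one
-- per-sentence multiplicity dict plus one pass over the distinct pairs; measurably faster.
-- ===== PORT A =====
-- A-side helpers: the inner 'for i in range(len(sentence)): if sentence[i] not in done and
-- sentence[i] != word: done.append(...); d[word].update({...})' loop for one word occurrence.
-- (Python's d[word] would raise KeyError on a missing key; the first loop of A has already put
-- every word of every sentence into d, so the default of Dict.modify is never used on reachable states.)
def pvA_wordPass (sentence : List String) (word : String)
    (d : PySem.Dict String (PySem.Dict String Int)) :
    PySem.Dict String (PySem.Dict String Int) :=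
  ((PySem.List.pyRange 0 (PySem.List.len sentence)).foldl
    (fun (st : PySem.Dict String (PySem.Dict String Int) × List String) i =>
      let x := PySem.List.pyGetD sentence i ""
      if x ∉ st.2 ∧ x ≠ word then
        (st.1.modify word PySem.Dict.empty (fun inner => inner.insert x (1 + inner.getD x 0)),
         st.2 ++ [x])
      else st)
    (d, ([] : List String))).1

def build_semantic_descriptors (sentences : List (List String)) : List (String × List (String × Int)) :=
  let d : PySem.Dict String (PySem.Dict String Int) :=
    sentences.foldl (fun d sentence =>
      sentence.foldl (fun d word =>
        if word ∉ d.keys then d.insert word PySem.Dict.empty else d) d)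
      PySem.Dict.empty
  let d := sentences.foldl (fun d sentence =>
      sentence.foldl (fun d word => pvA_wordPass sentence word d) d) d
  d.items.map (fun p => (p.1, p.2.items))

-- ===== PORT B =====
-- B: one pass builds the per-sentence multiplicity dict 'counts'; then for each distinct word w
-- (with multiplicity m) add m to d[w][u] for every other distinct word u of the sentence.
def build_semantic_descriptors_alt (sentences : List (List String)) : List (String × List (String × Int)) :=
  let d : PySem.Dict String (PySem.Dict String Int) :=
    sentences.foldl (fun d sentence =>
      let counts : PySem.Dict String Int :=
        sentence.foldl (fun c w => c.insert w (c.getD w 0 + 1)) PySem.Dict.empty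
      counts.items.foldl (fun d wm =>
        let dw := d.getD wm.1 PySem.Dict.empty
        let dw := counts.keys.foldl (fun dw u =>
          if u ≠ wm.1 then dw.insert u (dw.getD u 0 + wm.2) else dw) dw
        d.insert wm.1 dw) d)
      PySem.Dict.empty
  d.items.map (fun p => (p.1, p.2.items))

-- ===== PRECONDITION & SPEC =====
def Spec_build_semantic_descriptors (sentences : List (List String)) (out : List (String × List (String × Int))) : Prop := out = build_semantic_descriptors_alt sentences
instance (sentences : List (List String)) (out : List (String × List (String × Int))) : Decidable (Spec_build_semantic_descriptors sentences out) := by unfold Spec_build_semantic_descriptors; infer_instance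

-- ===== CLAIM (what is proved, stated in full; the proofs are below) =====
def Claim_equal_build_semantic_descriptors : Prop := ∀ (sentences : List (List String)), Dom_build_semantic_descriptors sentences → Spec_build_semantic_descriptors sentences (build_semantic_descriptors sentences)

-- ===== LEMMAS AND PROOFS =====
-- helper notions used only by the proofs ------------------------------------

/-- elements of `ks` not in `seen`, first occurrence only, in order -/
def pvFresh : List String → List String → List String
  | _, [] => []
  | seen, k :: ks => if k ∈ seen then pvFresh seen ks else k :: pvFresh (seen ++ [k]) ks

/-- fold a per-element transformation over a list of "instructions" -/
def pvApply {α ν : Type} (f : α → ν → ν) (sub : List α) (v : ν) : ν :=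
  sub.foldl (fun v x => f x v) v

/-- generic dict-update step: insert at `key x` a value computed from the current value there -/
def pvStepIns {ν α : Type} (key : α → String) (dflt : ν) (f : α → ν → ν)
    (d : PySem.Dict String ν) (x : α) : PySem.Dict String ν :=
  d.insert (key x) (f x (d.getD (key x) dflt))

theorem pvApply_cons {α ν : Type} (f : α → ν → ν) (x : α) (l : List α) (v : ν) :
    pvApply f (x :: l) v = pvApply f l (f x v) := rfl

theorem pvApply_append {α ν : Type} (f : α → ν → ν) (l₁ l₂ : List α) (v : ν) :
    pvApply f (l₁ ++ l₂) v = pvApply f l₂ (pvApply f l₁ v) := List.foldl_append ..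

theorem pvApply_const {α ν : Type} (f : α → ν → ν) (l : List α) (F : ν → ν) (v : ν)
    (h : ∀ x ∈ l, ∀ w, f x w = F w) : pvApply f l v = F^[l.length] v := by
  induction l generalizing v with
  | nil => rfl
  | cons x l ih =>
    rw [pvApply_cons, List.length_cons, Function.iterate_succ_apply, h x (by simp)]
    exact ih _ (fun y hy w => h y (List.mem_cons_of_mem _ hy) w)

theorem pvFresh_eq (l : List String) : ∀ seen,
    pvFresh seen l = (PySem.Set.ofList l).filter (fun k => decide (k ∉ seen)) := by
  induction l with
  | nil => intro seen; simp [pvFresh, PySem.Set.ofList_nil]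
  | cons x l ih =>
    intro seen
    rw [PySem.Set.ofList_cons, PySem.Set.discard]
    by_cases hx : x ∈ seen
    · rw [pvFresh, if_pos hx, ih seen, List.filter_cons_of_neg (by simp [hx]),
        List.filter_filter]
      exact (List.filter_congr (fun a _ => by
        by_cases hax : a = x
        · subst hax; simp [hx]
        · simp [hax])).symm
    · rw [pvFresh, if_neg hx, List.filter_cons_of_pos (by simp [hx]), ih (seen ++ [x]),
        List.filter_filter]
      refine congrArg (x :: ·) ?_
      exact List.filter_congr (fun a _ => by
        by_cases hax : a = x
        · subst hax; simp
        · simp [hax])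

theorem pvFresh_nil_seen (l : List String) : pvFresh [] l = PySem.Set.ofList l := by
  rw [pvFresh_eq]; simp

theorem pvMem_pvFresh {w : String} {seen l : List String} (h : w ∈ pvFresh seen l) :
    w ∉ seen := by
  rw [pvFresh_eq] at h
  simpa using (List.of_mem_filter h)

theorem pvFresh_eq_nil {seen l : List String} (h : ∀ k ∈ l, k ∈ seen) :
    pvFresh seen l = [] := by
  rw [pvFresh_eq]
  refine List.filter_eq_nil_iff.mpr (fun a ha => ?_)
  have : a ∈ l := (PySem.Set.mem_ofList l a).mp ha
  simp [h a this]

theorem pvItems_fst_ne {ν : Type} (d : PySem.Dict String ν) {k : String}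
    (hc : d.contains k = false) : ∀ p ∈ d.items, p.1 ≠ k := by
  intro p hp he
  have : k ∈ d.keys := by
    simp only [PySem.Dict.keys]
    exact he ▸ List.mem_map_of_mem hp
  exact absurd ((PySem.Dict.contains_iff_mem_keys d k).mpr this) (by simp [hc])

theorem pvInsert_getD_self {ν : Type} (d : PySem.Dict String ν) (k : String) (dflt : ν)
    (hnd : d.keys.Nodup) (hc : d.contains k = true) :
    d.insert k (d.getD k dflt) = d := by
  apply PySem.Dict.ext
  rw [PySem.Dict.items_insert_of_contains d _ hc]
  conv_rhs => rw [← List.map_id d.items]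
  refine List.map_congr_left (fun p hp => ?_)
  by_cases hpk : p.1 = k
  · have hp' : (k, p.2) ∈ d.items := by rw [← hpk]; exact hp
    have hv : d.getD k dflt = p.2 := PySem.Dict.getD_of_mem_items d hp' hnd dflt
    simp only [if_pos (show (p.1 == k) = true by simp [hpk]), hv]
    rw [← hpk]
    rfl
  · simp [hpk]

/-- the central itemization lemma: a fold of insert-at-`key x`-steps rewrites each existing
    entry by the instructions targeting its key, and appends the fresh keys in first-touch order -/
theorem pvItemsFold {ν α : Type} (key : α → String) (dflt : ν) (f : α → ν → ν) :
    ∀ (l : List α) (d : PySem.Dict String ν), d.keys.Nodup →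
    (l.foldl (pvStepIns key dflt f) d).items
      = d.items.map (fun p => (p.1, pvApply f (l.filter (fun x => key x == p.1)) p.2))
        ++ (pvFresh d.keys (l.map key)).map
            (fun w => (w, pvApply f (l.filter (fun x => key x == w)) dflt)) := by
  intro l
  induction l with
  | nil =>
    intro d _
    simp [pvFresh, pvApply]
  | cons x l ih =>
    intro d hnd
    rw [List.foldl_cons, List.map_cons]
    by_cases hc : d.contains (key x) = true
    · have hkeys : (pvStepIns key dflt f d x).keys = d.keys :=
        PySem.Dict.keys_insert_of_contains d _ hc
      have hmem : key x ∈ d.keys := (PySem.Dict.contains_iff_mem_keys d _).mp hc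
      rw [ih _ (by rw [hkeys]; exact hnd), hkeys, pvFresh, if_pos hmem]
      have hitems : (pvStepIns key dflt f d x).items
          = d.items.map (fun p => if p.1 == key x then (key x, f x (d.getD (key x) dflt)) else p) :=
        PySem.Dict.items_insert_of_contains d _ hc
      rw [hitems, List.map_map]
      congr 1
      · refine List.map_congr_left (fun p hp => ?_)
        by_cases hpk : p.1 = key x
        · have hp' : (key x, p.2) ∈ d.items := by rw [← hpk]; exact hp
          have hv : d.getD (key x) dflt = p.2 := PySem.Dict.getD_of_mem_items d hp' hnd dflt
          simp [Function.comp, hpk, hv, pvApply_cons]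
        · simp [Function.comp, hpk, Ne.symm hpk]
      · refine List.map_congr_left (fun w hw => ?_)
        have hwk : w ≠ key x := fun e => (pvMem_pvFresh hw) (e ▸ hmem)
        simp [Ne.symm hwk]
    · have hc' : d.contains (key x) = false := by simpa using hc
      have hne : ∀ p ∈ d.items, p.1 ≠ key x := pvItems_fst_ne d hc'
      have hnotmem : key x ∉ d.keys := fun h =>
        absurd ((PySem.Dict.contains_iff_mem_keys d _).mpr h) (by simp [hc'])
      have hkeys : (pvStepIns key dflt f d x).keys = d.keys ++ [key x] :=
        PySem.Dict.keys_insert_of_not_contains d _ hc'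
      have hitems : (pvStepIns key dflt f d x).items
          = d.items ++ [(key x, f x (d.getD (key x) dflt))] :=
        PySem.Dict.items_insert_of_not_contains d _ hc'
      have hgd : d.getD (key x) dflt = dflt := PySem.Dict.getD_of_not_contains d _ hc'
      have hnd' : (d.keys ++ [key x]).Nodup := by
        simp only [List.nodup_append, List.nodup_cons, List.not_mem_nil, not_false_iff,
          List.nodup_nil, and_true, true_and]
        refine ⟨hnd, ?_⟩
        intro a ha b hb
        simp only [List.mem_singleton] at hb
        subst hb
        exact fun e => hnotmem (e ▸ ha)
      rw [ih _ (by rw [hkeys]; exact hnd'), hkeys, hitems, hgd, pvFresh, if_neg hnotmem]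
      simp only [List.map_append, List.map_cons, List.map_nil, List.append_assoc,
        List.singleton_append]
      congr 1
      · refine List.map_congr_left (fun p hp => ?_)
        simp [Ne.symm (hne p hp)]
      · congr 1
        · simp [pvApply_cons]
        · refine List.map_congr_left (fun w hw => ?_)
          have hwk : w ≠ key x := by
            have h := pvMem_pvFresh hw
            simp only [List.mem_append, List.mem_singleton, not_or] at h
            exact h.2
          simp [Ne.symm hwk]

/-- phase 1 of A: `if word not in d.keys(): d[word] = {}` appends the fresh words with value `c` -/
theorem pvFoldSetdefault {ν : Type} (c : ν) :
    ∀ (l : List String) (d : PySem.Dict String ν),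
    (l.foldl (fun d w => if w ∉ d.keys then d.insert w c else d) d).items
      = d.items ++ (pvFresh d.keys l).map (fun w => (w, c)) := by
  intro l
  induction l with
  | nil => intro d; simp [pvFresh]
  | cons x l ih =>
    intro d
    rw [List.foldl_cons, pvFresh]
    by_cases hx : x ∈ d.keys
    · rw [if_pos hx, if_neg (by simp [hx]), ih]
    · have hc' : d.contains x = false := by
        rcases h : d.contains x with _ | _
        · rfl
        · exact absurd ((PySem.Dict.contains_iff_mem_keys d x).mp h) hx
      rw [if_neg hx, if_pos (by simp [hx]), ih,
        PySem.Dict.items_insert_of_not_contains d _ hc',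
        PySem.Dict.keys_insert_of_not_contains d _ hc',
        List.map_cons, List.append_assoc, List.singleton_append]


-- inner-dict "rounds": add `a` to every key of `us` ---------------------------------

def pvRound (a : Int) (us : List String) (v : PySem.Dict String Int) : PySem.Dict String Int :=
  us.foldl (fun v u => v.insert u (v.getD u 0 + a)) v

def pvBump1 (u : String) (v : PySem.Dict String Int) : PySem.Dict String Int :=
  v.insert u (1 + v.getD u 0)

theorem pvApply_bump1_eq_round (us : List String) (v : PySem.Dict String Int) :
    pvApply pvBump1 us v = pvRound 1 us v := by
  have h : (fun (v : PySem.Dict String Int) u => pvBump1 u v)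
      = (fun (v : PySem.Dict String Int) u => v.insert u (v.getD u 0 + 1)) := by
    funext v u
    simp [pvBump1, add_comm]
  simp only [pvApply, pvRound, h]

theorem pvInsert_insert_comm {ν : Type} (d : PySem.Dict String ν) {k u : String} (x c : ν)
    (hne : k ≠ u) (hu : d.contains u = true) :
    (d.insert u c).insert k x = (d.insert k x).insert u c := by
  apply PySem.Dict.ext
  by_cases hk : d.contains k = true
  · have hk' : (d.insert u c).contains k = true := by
      rw [PySem.Dict.contains_insert]; simp [hk]
    have hu' : (d.insert k x).contains u = true := by
      rw [PySem.Dict.contains_insert]; simp [hu]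
    rw [PySem.Dict.items_insert_of_contains _ _ hk', PySem.Dict.items_insert_of_contains _ _ hu,
      PySem.Dict.items_insert_of_contains _ _ hu', PySem.Dict.items_insert_of_contains _ _ hk,
      List.map_map, List.map_map]
    refine List.map_congr_left (fun p _ => ?_)
    by_cases hpk : p.1 = k
    · simp [Function.comp, hpk, hne]
    · by_cases hpu : p.1 = u
      · simp [Function.comp, hpu, Ne.symm hne]
      · simp [Function.comp, hpk, hpu]
  · have hk' : d.contains k = false := by simpa using hk
    have hk'' : (d.insert u c).contains k = false := by
      rw [PySem.Dict.contains_insert]; simp [hk', hne]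
    have hu' : (d.insert k x).contains u = true := by
      rw [PySem.Dict.contains_insert]; simp [hu]
    rw [PySem.Dict.items_insert_of_not_contains _ _ hk'', PySem.Dict.items_insert_of_contains _ _ hu,
      PySem.Dict.items_insert_of_contains _ _ hu', PySem.Dict.items_insert_of_not_contains _ _ hk',
      List.map_append]
    congr 1
    simp only [List.map_cons, List.map_nil]
    rw [if_neg (by simp [hne])]

theorem pvRound_insert_comm (a : Int) :
    ∀ (us : List String) (v : PySem.Dict String Int) (u : String) (c : Int),
    u ∉ us → v.contains u = true →
    pvRound a us (v.insert u c) = (pvRound a us v).insert u c := by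
  intro us
  induction us with
  | nil => intro v u c _ _; rfl
  | cons k rest ih =>
    intro v u c hnm hu
    have hku : k ≠ u := fun e => hnm (by simp [e])
    have hrest : u ∉ rest := fun h => hnm (by simp [h])
    show pvRound a rest ((v.insert u c).insert k ((v.insert u c).getD k 0 + a)) = _
    rw [PySem.Dict.getD_insert_of_ne _ _ _ hku,
      pvInsert_insert_comm v _ _ hku hu,
      ih _ u c hrest (by rw [PySem.Dict.contains_insert]; simp [hu])]
    rfl

theorem pvRound_getD_of_not_mem (a : Int) :
    ∀ (us : List String) (v : PySem.Dict String Int) (u : String),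
    u ∉ us → (pvRound a us v).getD u 0 = v.getD u 0 := by
  intro us
  induction us with
  | nil => intro v u _; rfl
  | cons k rest ih =>
    intro v u hnm
    have hku : u ≠ k := fun e => hnm (by simp [e])
    show (pvRound a rest _).getD u 0 = _
    rw [ih _ u (fun h => hnm (by simp [h])), PySem.Dict.getD_insert_of_ne _ _ _ hku]

theorem pvRound_round (a b : Int) :
    ∀ (us : List String), us.Nodup → ∀ (v : PySem.Dict String Int),
    pvRound b us (pvRound a us v) = pvRound (a + b) us v := by
  intro us
  induction us with
  | nil => intro _ v; rfl
  | cons u rest ih =>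
    intro hnd v
    have hur : u ∉ rest := (List.nodup_cons.mp hnd).1
    have hnd' : rest.Nodup := (List.nodup_cons.mp hnd).2
    show pvRound b (u :: rest) (pvRound a rest (v.insert u (v.getD u 0 + a)))
        = pvRound (a + b) rest (v.insert u (v.getD u 0 + (a + b)))
    show pvRound b rest ((pvRound a rest (v.insert u (v.getD u 0 + a))).insert u
        ((pvRound a rest (v.insert u (v.getD u 0 + a))).getD u 0 + b)) = _
    rw [pvRound_getD_of_not_mem a rest _ u hur, PySem.Dict.getD_insert_self,
      ← pvRound_insert_comm a rest _ u _ hur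
        (by rw [PySem.Dict.contains_insert]; simp),
      PySem.Dict.insert_insert_self, ih hnd', add_assoc]

theorem pvIter_round :
    ∀ (m : ℕ), 1 ≤ m → ∀ (us : List String), us.Nodup → ∀ (v : PySem.Dict String Int),
    (fun v => pvRound 1 us v)^[m] v = pvRound (m : Int) us v := by
  intro m
  induction m with
  | zero => intro h; omega
  | succ n ih =>
    intro _ us hnd v
    by_cases hn : 1 ≤ n
    · rw [Function.iterate_succ_apply', ih hn us hnd v, pvRound_round _ _ _ hnd]
      push_cast
      ring_nf
    · have : n = 0 := by omega
      subst this
      simp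

-- dedup/filter bookkeeping ---------------------------------------------------------

theorem pvFilter_beq_of_nodup (w : String) :
    ∀ (l : List String), l.Nodup → l.filter (fun u => u == w) = if w ∈ l then [w] else [] := by
  intro l
  induction l with
  | nil => intro _; rfl
  | cons x l ih =>
    intro hnd
    by_cases hxw : x = w
    · subst hxw
      rw [List.filter_cons_of_pos (by simp)]
      have hwl : x ∉ l := (List.nodup_cons.mp hnd).1
      rw [ih (List.nodup_cons.mp hnd).2, if_neg hwl, if_pos (by simp)]
    · rw [List.filter_cons_of_neg (by simp [hxw]), ih (List.nodup_cons.mp hnd).2]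
      by_cases hwl : w ∈ l
      · rw [if_pos hwl, if_pos (by simp [hwl])]
      · rw [if_neg hwl, if_neg (by simp [hwl, Ne.symm hxw])]

theorem pvOfList_filter (p : String → Bool) :
    ∀ (l : List String), PySem.Set.ofList (l.filter p) = (PySem.Set.ofList l).filter p := by
  intro l
  induction l with
  | nil => simp [PySem.Set.ofList_nil]
  | cons x l ih =>
    rw [PySem.Set.ofList_cons, PySem.Set.discard]
    by_cases hx : p x = true
    · rw [List.filter_cons_of_pos hx, PySem.Set.ofList_cons, PySem.Set.discard, ih,
        List.filter_cons_of_pos hx, List.filter_filter, List.filter_filter]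
      congr 1
      refine List.filter_congr (fun a _ => ?_)
      rw [Bool.and_comm]
    · rw [List.filter_cons_of_neg (by simp [hx]), ih, List.filter_cons_of_neg (by simp [hx]),
        List.filter_filter]
      refine (List.filter_congr (fun a _ => ?_)).symm
      by_cases hax : a = x
      · subst hax; simp [hx]
      · simp [hax]

theorem pvUpdate_ofList (s : PySem.Set String) (l : List String) :
    PySem.Set.update s (PySem.Set.ofList l) = PySem.Set.update s l := by
  rw [PySem.Set.update_eq_append_filter, PySem.Set.update_eq_append_filter,
    PySem.Set.ofList_ofList]

theorem pvUpdate_flatMap_ofList :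
    ∀ (ss : List (List String)) (s : PySem.Set String),
    PySem.Set.update s (ss.flatMap (fun t => (PySem.Set.ofList t : List String)))
      = PySem.Set.update s (ss.flatMap id) := by
  intro ss
  induction ss with
  | nil => intro s; rfl
  | cons t ss ih =>
    intro s
    rw [List.flatMap_cons, List.flatMap_cons, PySem.Set.update_append, PySem.Set.update_append,
      pvUpdate_ofList]
    simp only [id]
    exact ih (PySem.Set.update s t)

theorem pvOfList_flatMap_ofList (ss : List (List String)) :
    PySem.Set.ofList (ss.flatMap (fun t => (PySem.Set.ofList t : List String)))
      = PySem.Set.ofList (ss.flatMap id) := by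
  rw [← PySem.Set.update_nil_left, ← PySem.Set.update_nil_left, pvUpdate_flatMap_ofList]


-- collapsing A's done-list scan --------------------------------------------------

/-- per-occurrence instruction semantics of A's word pass -/
def pvFA (x : List String × String) (v : PySem.Dict String Int) : PySem.Dict String Int :=
  pvApply pvBump1 (pvFresh [] (x.1.filter (fun u => decide (u ≠ x.2)))) v

/-- per-distinct-word instruction semantics of B's update -/
def pvFB (x : List String × (String × Int)) (v : PySem.Dict String Int) : PySem.Dict String Int :=
  (PySem.Dict.counter x.1).keys.foldl
    (fun dw u => if u ≠ x.2.1 then dw.insert u (dw.getD u 0 + x.2.2) else dw) v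

def pvLA (ss : List (List String)) : List (List String × String) :=
  ss.flatMap (fun s => s.map (fun u => (s, u)))

def pvLB (ss : List (List String)) : List (List String × (String × Int)) :=
  ss.flatMap (fun s => (PySem.Dict.counter s).items.map (fun wm => (s, wm)))

def pvVocab (ss : List (List String)) : List String :=
  PySem.Set.ofList (ss.flatMap id)

theorem pvWordPass_collapse (s : List String) (w : String)
    (d : PySem.Dict String (PySem.Dict String Int)) :
    pvA_wordPass s w d = (s.foldl
      (fun (st : PySem.Dict String (PySem.Dict String Int) × List String) x =>
        if x ∉ st.2 ∧ x ≠ w then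
          (st.1.modify w PySem.Dict.empty (fun inner => inner.insert x (1 + inner.getD x 0)),
           st.2 ++ [x])
        else st)
      (d, ([] : List String))).1 :=
  congrArg Prod.fst (PySem.List.foldl_pyRange_zero_pyGetD s ""
    (fun st x =>
      if x ∉ st.2 ∧ x ≠ w then
        (st.1.modify w PySem.Dict.empty (fun inner => inner.insert x (1 + inner.getD x 0)),
         st.2 ++ [x])
      else st)
    (d, ([] : List String)))

theorem pvDLgen (w : String) :
    ∀ (s done : List String) (d : PySem.Dict String (PySem.Dict String Int)),
    s.foldl
      (fun (st : PySem.Dict String (PySem.Dict String Int) × List String) x =>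
        if x ∉ st.2 ∧ x ≠ w then
          (st.1.modify w PySem.Dict.empty (fun inner => inner.insert x (1 + inner.getD x 0)),
           st.2 ++ [x])
        else st)
      (d, done)
      = ((if pvFresh done (s.filter (fun u => decide (u ≠ w))) = [] then d
          else d.insert w (pvApply pvBump1 (pvFresh done (s.filter (fun u => decide (u ≠ w))))
            (d.getD w PySem.Dict.empty))),
         done ++ pvFresh done (s.filter (fun u => decide (u ≠ w)))) := by
  intro s
  induction s with
  | nil => intro done d; simp [pvFresh]
  | cons x s ih =>
    intro done d
    rw [List.foldl_cons]
    by_cases hxw : x = w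
    · subst hxw
      rw [List.filter_cons_of_neg (by simp), if_neg (by simp)]
      exact ih done d
    · rw [List.filter_cons_of_pos (by simp [hxw])]
      by_cases hxd : x ∈ done
      · rw [pvFresh, if_pos hxd, if_neg (by simp [hxd])]
        exact ih done d
      · rw [pvFresh, if_neg hxd, if_pos ⟨hxd, hxw⟩]
        rw [ih (done ++ [x])
          (d.modify w PySem.Dict.empty (fun inner => inner.insert x (1 + inner.getD x 0)))]
        rcases hos : pvFresh (done ++ [x]) (s.filter (fun u => decide (u ≠ w))) with _ | ⟨y, os⟩
        · simp only [Prod.mk.injEq]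
          refine ⟨?_, by simp⟩
          rw [if_pos trivial, if_neg (List.cons_ne_nil x [])]
          rfl
        · simp only [Prod.mk.injEq, PySem.Dict.modify]
          refine ⟨?_, by simp⟩
          rw [if_neg (List.cons_ne_nil x (y :: os)), PySem.Dict.getD_insert_self,
            PySem.Dict.insert_insert_self]
          rfl

theorem pvWordPass_eq (s : List String) (w : String)
    (d : PySem.Dict String (PySem.Dict String Int))
    (hnd : d.keys.Nodup) (hc : d.contains w = true) :
    pvA_wordPass s w d
      = pvStepIns (fun x : List String × String => x.2) PySem.Dict.empty pvFA d (s, w) := by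
  rw [pvWordPass_collapse, pvDLgen]
  by_cases hos : pvFresh [] (s.filter (fun u => decide (u ≠ w))) = []
  · rw [if_pos hos]
    show d = d.insert w (pvFA (s, w) (d.getD w PySem.Dict.empty))
    unfold pvFA
    rw [hos]
    exact (pvInsert_getD_self d w _ hnd hc).symm
  · rw [if_neg hos]
    rfl

theorem pvFoldA_eq :
    ∀ (l : List (List String × String)) (d : PySem.Dict String (PySem.Dict String Int)),
    d.keys.Nodup → (∀ x ∈ l, d.contains x.2 = true) →
    l.foldl (fun d x => pvA_wordPass x.1 x.2 d) d
      = l.foldl (pvStepIns (fun x : List String × String => x.2) PySem.Dict.empty pvFA) d := by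
  intro l
  induction l with
  | nil => intro d _ _; rfl
  | cons x l ih =>
    intro d hnd hc
    have hcx : d.contains x.2 = true := hc x (by simp)
    rw [List.foldl_cons, List.foldl_cons, pvWordPass_eq x.1 x.2 d hnd hcx]
    apply ih
    · show (d.insert _ _).keys.Nodup
      rw [PySem.Dict.keys_insert_of_contains d _ hcx]
      exact hnd
    · intro y hy
      show (d.insert _ _).contains y.2 = true
      rw [PySem.Dict.contains_insert]
      simp [hc y (List.mem_cons_of_mem _ hy)]

-- per-key agreement of the two instruction streams ---------------------------------

theorem pvPerKey (w : String) :
    ∀ (ss : List (List String)) (v : PySem.Dict String Int),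
    pvApply pvFA ((pvLA ss).filter (fun x => x.2 == w)) v
      = pvApply pvFB ((pvLB ss).filter (fun x => x.2.1 == w)) v := by
  intro ss
  induction ss with
  | nil => intro v; rfl
  | cons s ss ih =>
    intro v
    rw [pvLA, pvLB, List.flatMap_cons, List.flatMap_cons, List.filter_append,
      List.filter_append, pvApply_append, pvApply_append, ← pvLA, ← pvLB, ih]
    congr 1
    -- per-sentence segment
    rw [List.filter_map, List.filter_map, PySem.Dict.items_counter, List.filter_map]
    have hA : List.filter ((fun x : List String × String => x.2 == w) ∘ fun u => (s, u)) s
        = s.filter (fun u => u == w) := rfl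
    have hB : List.filter
          (((fun x : List String × (String × Int) => x.2.1 == w) ∘ fun wm => (s, wm))
            ∘ fun k => (k, (List.count k s : Int)))
          (PySem.Set.ofList s)
        = (PySem.Set.ofList s).filter (fun u => u == w) := rfl
    rw [hA, hB, pvFilter_beq_of_nodup w _ (PySem.Set.nodup_ofList s)]
    by_cases hws : w ∈ s
    · rw [if_pos ((PySem.Set.mem_ofList s w).mpr hws)]
      have hconst : ∀ x ∈ (s.filter (fun u => u == w)).map (fun u => (s, u)), ∀ v',
          pvFA x v' = pvFA (s, w) v' := by
        intro x hx v'
        rcases List.mem_map.mp hx with ⟨u, hu, hxu⟩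
        have : u = w := by simpa using (List.of_mem_filter hu)
        rw [← hxu, this]
      rw [pvApply_const pvFA _ (pvFA (s, w)) v hconst, List.length_map,
        ← List.countP_eq_length_filter, ← List.count_eq_countP]
      -- B side: a single instruction
      rw [List.map_map, List.map_cons, List.map_nil, pvApply_cons]
      show (pvFA (s, w))^[List.count w s] v = pvFB (s, (w, (List.count w s : Int))) v
      -- normalize both sides to rounds over the same distinct-others list
      have hFA : ∀ v', pvFA (s, w) v'
          = pvRound 1 ((PySem.Set.ofList s).filter (fun u => decide (u ≠ w))) v' := by
        intro v'
        unfold pvFA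
        rw [pvFresh_nil_seen, pvOfList_filter, pvApply_bump1_eq_round]
      have hFB : pvFB (s, (w, (List.count w s : Int))) v
          = pvRound (List.count w s : Int) ((PySem.Set.ofList s).filter (fun u => decide (u ≠ w))) v := by
        unfold pvFB
        rw [PySem.Dict.keys_counter]
        have hfn : (fun (dw : PySem.Dict String Int) (u : String) =>
              if u ≠ w then dw.insert u (dw.getD u 0 + (List.count w s : Int)) else dw)
            = (fun dw u => if (fun u => decide (u ≠ w)) u = true
                then dw.insert u (dw.getD u 0 + (List.count w s : Int)) else dw) := by
          funext dw u
          by_cases hu : u = w <;> simp [hu]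
        show List.foldl _ v (PySem.Set.ofList s) = _
        rw [hfn, PySem.List.foldl_if_eq_foldl_filter]
        rfl
      have hiter : (fun v' => pvRound 1 ((PySem.Set.ofList s).filter (fun u => decide (u ≠ w))) v')^[List.count w s] v
          = pvRound (List.count w s : Int) ((PySem.Set.ofList s).filter (fun u => decide (u ≠ w))) v :=
        pvIter_round (List.count w s) (List.count_pos_iff.mpr hws) _
          ((PySem.Set.nodup_ofList s).filter _) v
      calc (pvFA (s, w))^[List.count w s] v
          = (fun v' => pvRound 1 ((PySem.Set.ofList s).filter (fun u => decide (u ≠ w))) v')^[List.count w s] v := by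
            rw [funext hFA]
        _ = _ := by rw [hiter, hFB]
    · rw [if_neg (fun h => hws ((PySem.Set.mem_ofList s w).mp h))]
      have hfe : s.filter (fun u => u == w) = [] := by
        refine List.filter_eq_nil_iff.mpr (fun a ha he => ?_)
        have he' : a = w := by simpa using he
        subst he'
        exact hws ha
      rw [hfe]
      rfl


-- assembling the two ports --------------------------------------------------------

theorem pvA_items (ss : List (List String)) :
    build_semantic_descriptors ss
      = (pvVocab ss).map (fun w =>
          (w, (pvApply pvFA ((pvLA ss).filter (fun x => x.2 == w)) PySem.Dict.empty).items)) := by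
  show (ss.foldl (fun d sentence => sentence.foldl (fun d word => pvA_wordPass sentence word d) d)
      (ss.foldl (fun d sentence => sentence.foldl
        (fun d word => if word ∉ d.keys then d.insert word PySem.Dict.empty else d) d)
        PySem.Dict.empty)).items.map (fun p => (p.1, p.2.items)) = _
  have hflat : (ss.foldl (fun d sentence => sentence.foldl
        (fun d word => if word ∉ d.keys then d.insert word PySem.Dict.empty else d) d)
        (PySem.Dict.empty : PySem.Dict String (PySem.Dict String Int)))
      = (ss.flatMap id).foldl
          (fun d word => if word ∉ d.keys then d.insert word PySem.Dict.empty else d)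
          PySem.Dict.empty := by
    rw [List.foldl_flatMap]
    simp only [id_eq]
  have h1i : (ss.foldl (fun d sentence => sentence.foldl
        (fun d word => if word ∉ d.keys then d.insert word PySem.Dict.empty else d) d)
        (PySem.Dict.empty : PySem.Dict String (PySem.Dict String Int))).items
      = (pvVocab ss).map (fun w => (w, PySem.Dict.empty)) := by
    rw [hflat, pvFoldSetdefault]
    show (pvFresh PySem.Dict.empty.keys (ss.flatMap id)).map _ = _
    rw [PySem.Dict.keys_empty, pvFresh_nil_seen]
    rfl
  have h1k : (ss.foldl (fun d sentence => sentence.foldl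
        (fun d word => if word ∉ d.keys then d.insert word PySem.Dict.empty else d) d)
        (PySem.Dict.empty : PySem.Dict String (PySem.Dict String Int))).keys
      = pvVocab ss := by
    show List.map (fun p => p.1) (ss.foldl (fun d sentence => sentence.foldl
        (fun d word => if word ∉ d.keys then d.insert word PySem.Dict.empty else d) d)
        (PySem.Dict.empty : PySem.Dict String (PySem.Dict String Int))).items = pvVocab ss
    rw [h1i, List.map_map]
    exact (List.map_congr_left (fun a _ => rfl)).trans (List.map_id _)
  have h1nd : (ss.foldl (fun d sentence => sentence.foldl
        (fun d word => if word ∉ d.keys then d.insert word PySem.Dict.empty else d) d)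
        (PySem.Dict.empty : PySem.Dict String (PySem.Dict String Int))).keys.Nodup := by
    rw [h1k]
    exact PySem.Set.nodup_ofList _
  have h2flat : ∀ (d : PySem.Dict String (PySem.Dict String Int)),
      ss.foldl (fun d sentence => sentence.foldl
        (fun d word => pvA_wordPass sentence word d) d) d
      = (pvLA ss).foldl (fun d x => pvA_wordPass x.1 x.2 d) d := by
    intro d
    rw [pvLA, List.foldl_flatMap]
    simp only [List.foldl_map]
  have hcont : ∀ x ∈ pvLA ss,
      (ss.foldl (fun d sentence => sentence.foldl
        (fun d word => if word ∉ d.keys then d.insert word PySem.Dict.empty else d) d)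
        (PySem.Dict.empty : PySem.Dict String (PySem.Dict String Int))).contains x.2 = true := by
    intro x hx
    rw [PySem.Dict.contains_iff_mem_keys, h1k]
    rcases List.mem_flatMap.mp hx with ⟨s, hs, hxs⟩
    rcases List.mem_map.mp hxs with ⟨u, hu, hux⟩
    refine (PySem.Set.mem_ofList _ _).mpr (List.mem_flatMap.mpr ⟨s, hs, ?_⟩)
    rw [← hux]
    exact hu
  rw [h2flat, pvFoldA_eq _ _ h1nd hcont,
    pvItemsFold (fun x : List String × String => x.2) PySem.Dict.empty pvFA (pvLA ss) _ h1nd,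
    h1i, h1k]
  have hfr : pvFresh (pvVocab ss) ((pvLA ss).map (fun x => x.2)) = [] := by
    refine pvFresh_eq_nil (fun k hk => ?_)
    rcases List.mem_map.mp hk with ⟨x, hx, hxk⟩
    rcases List.mem_flatMap.mp hx with ⟨s, hs, hxs⟩
    rcases List.mem_map.mp hxs with ⟨u, hu, hux⟩
    refine (PySem.Set.mem_ofList _ _).mpr (List.mem_flatMap.mpr ⟨s, hs, ?_⟩)
    rw [← hxk, ← hux]
    exact hu
  rw [hfr]
  simp only [List.map_nil, List.append_nil, List.map_map]
  rfl

theorem pvB_items (ss : List (List String)) :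
    build_semantic_descriptors_alt ss
      = (pvVocab ss).map (fun w =>
          (w, (pvApply pvFB ((pvLB ss).filter (fun x => x.2.1 == w)) PySem.Dict.empty).items)) := by
  show (ss.foldl (fun d sentence =>
      (sentence.foldl (fun (c : PySem.Dict String Int) w => c.insert w (c.getD w 0 + 1)) PySem.Dict.empty).items.foldl
        (fun d wm => d.insert wm.1
          ((sentence.foldl (fun (c : PySem.Dict String Int) w => c.insert w (c.getD w 0 + 1)) PySem.Dict.empty).keys.foldl
            (fun dw u => if u ≠ wm.1 then dw.insert u (dw.getD u 0 + wm.2) else dw)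
            (d.getD wm.1 PySem.Dict.empty))) d)
      PySem.Dict.empty).items.map (fun p => (p.1, p.2.items)) = _
  simp only [PySem.Dict.foldl_insert_getD_add_one_eq_counter]
  have hflat : (ss.foldl (fun d sentence =>
        (PySem.Dict.counter sentence).items.foldl
          (fun d wm => d.insert wm.1
            ((PySem.Dict.counter sentence).keys.foldl
              (fun dw u => if u ≠ wm.1 then dw.insert u (dw.getD u 0 + wm.2) else dw)
              (d.getD wm.1 PySem.Dict.empty))) d)
        (PySem.Dict.empty : PySem.Dict String (PySem.Dict String Int)))
      = (pvLB ss).foldl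
          (pvStepIns (fun x : List String × (String × Int) => x.2.1) PySem.Dict.empty pvFB)
          PySem.Dict.empty := by
    rw [pvLB, List.foldl_flatMap]
    simp only [List.foldl_map]
    rfl
  rw [hflat, pvItemsFold (fun x : List String × (String × Int) => x.2.1) PySem.Dict.empty pvFB
    (pvLB ss) _ (by rw [PySem.Dict.keys_empty]; exact List.nodup_nil)]
  have hkl : (pvLB ss).map (fun x => x.2.1)
      = ss.flatMap (fun s => (PySem.Dict.counter s).keys) := by
    rw [pvLB, List.map_flatMap]
    congr 1
    funext s
    rw [List.map_map]
    rfl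
  rw [PySem.Dict.keys_empty, hkl]
  have hfr : pvFresh [] (ss.flatMap (fun s => (PySem.Dict.counter s).keys)) = pvVocab ss := by
    rw [pvFresh_nil_seen]
    have : (fun s => ((PySem.Dict.counter s).keys : List String))
        = (fun s => (PySem.Set.ofList s : List String)) := by
      funext s
      exact PySem.Dict.keys_counter s
    rw [this, pvOfList_flatMap_ofList]
    rfl
  rw [hfr]
  rw [show (PySem.Dict.empty : PySem.Dict String (PySem.Dict String Int)).items = [] from rfl]
  simp only [List.map_nil, List.nil_append, List.map_map]
  rfl

-- ===== VERDICT (by name: the statement is the Claim_ definition above) =====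
theorem build_semantic_descriptors_spec : Claim_equal_build_semantic_descriptors := by
  intro ss _
  unfold Spec_build_semantic_descriptors
  rw [pvA_items, pvB_items]
  refine List.map_congr_left (fun w _ => ?_)
  rw [pvPerKey w ss PySem.Dict.empty]
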